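-- pv_equiv track=rewrite | github.com/norwd/esperantolibroj | fix_ebooks.py | remove_repeated_headers
-- ===== SOURCE A (Python) =====
-- from collections import Counter
--
-- def remove_repeated_headers(text, headers):
--     """
--     Remove repeated page headers from the body of the text.
--     Keep only the FIRST occurrence of each header (which is in the front matter).
--     All subsequent occurrences throughout the body are removed.
--     """
--     if not headers:
--         return text
--
--     lines_list = text.split('\n')
--     new_lines = []
--     header_seen = Counter()
--
--     for line in lines_list:
--         stripped = line.strip()
--         if stripped in headers:
--             header_seen[stripped] += 1
--             if header_seen[stripped] <= 1:
--                 # Keep first occurrence (front matter / title area)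
--                 new_lines.append(line)
--             # else: skip this repeated header line
--         else:
--             new_lines.append(line)
--
--     return '\n'.join(new_lines)
-- ===== SOURCE B (Python) =====
-- def remove_repeated_headers(text, headers):
--     """
--     Remove repeated page headers from the body of the text.
--     Keep only the FIRST occurrence of each header.
--     Two passes: first build an index of each header's first line number,
--     then filter the lines against that index (no running seen-set).
--     """
--     if not headers:
--         return text
--
--     lines = text.split('\n')
--
--     first_idx = {}
--     for i, line in enumerate(lines):
--         s = line.strip()
--         if s in headers and s not in first_idx:
--             first_idx[s] = i
--
--     kept = [line for i, line in enumerate(lines)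
--             if line.strip() not in headers or first_idx[line.strip()] == i]
--     return '\n'.join(kept)
-- ===== Notes on version B (the rewrite author's own statement) =====
-- stated objective: alternative
-- what changed: Replaces the single pass with a running Counter of seen headers by two separate passes: first build a dict mapping each header to the index of its first occurrence, then filter the lines against that index table.
import Mathlib
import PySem

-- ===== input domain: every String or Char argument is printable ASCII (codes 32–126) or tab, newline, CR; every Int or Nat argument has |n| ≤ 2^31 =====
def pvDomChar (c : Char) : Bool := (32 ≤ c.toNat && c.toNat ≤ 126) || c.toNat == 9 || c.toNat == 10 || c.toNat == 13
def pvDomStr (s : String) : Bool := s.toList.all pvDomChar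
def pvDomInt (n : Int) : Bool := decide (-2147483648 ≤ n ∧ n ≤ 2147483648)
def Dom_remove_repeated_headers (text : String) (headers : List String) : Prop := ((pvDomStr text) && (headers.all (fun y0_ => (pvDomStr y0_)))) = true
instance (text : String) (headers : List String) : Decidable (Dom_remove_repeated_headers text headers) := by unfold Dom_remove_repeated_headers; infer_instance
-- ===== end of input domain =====

-- B replaces A's single pass with a running Counter by two separate passes (build a
-- first-occurrence index, then filter against it); alternative decomposition, same cost.


-- ===== PORT A =====
-- the 'for line in lines_list' loop: state = (emitted so far via cons, header_seen Counter)
def pvGoA (headers : List String) : List String → PySem.Dict String Int → List String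
  | [], _ => []
  | l :: rest, cnt =>
    let st := PySem.Str.strip l
    if headers.contains st then
      let cnt' := cnt.modify st 0 (· + 1)
      if cnt'.getD st 0 ≤ 1 then l :: pvGoA headers rest cnt'
      else pvGoA headers rest cnt'
    else l :: pvGoA headers rest cnt

def remove_repeated_headers (text : String) (headers : List String) : String :=
  if headers.isEmpty then text
  else
    let lines_list := (PySem.Str.split? text "\n").getD []
    PySem.Str.join "\n" (pvGoA headers lines_list PySem.Dict.empty)

-- ===== PORT B =====
-- first pass: build the dict first_idx (header stripped value ↦ smallest line index)
def pvBuildIdx (headers : List String) : List (Int × String) → PySem.Dict String Int → PySem.Dict String Int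
  | [], d => d
  | (i, l) :: rest, d =>
    let s := PySem.Str.strip l
    if headers.contains s && !(d.contains s) then pvBuildIdx headers rest (d.insert s i)
    else pvBuildIdx headers rest d

def remove_repeated_headers_alt (text : String) (headers : List String) : String :=
  if headers.isEmpty then text
  else
    let lines := (PySem.Str.split? text "\n").getD []
    let fi := pvBuildIdx headers (PySem.List.enumerate lines 0) PySem.Dict.empty
    -- second pass: keep line i iff not a header or first_idx[stripped] == i
    PySem.Str.join "\n"
      (((PySem.List.enumerate lines 0).filter
          (fun p => !(headers.contains (PySem.Str.strip p.2)) ||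
                    (fi.get? (PySem.Str.strip p.2) == some p.1))).map (·.2))

-- ===== PRECONDITION & SPEC =====
def Spec_remove_repeated_headers (text : String) (headers : List String) (out : String) : Prop := out = remove_repeated_headers_alt text headers
instance (text : String) (headers : List String) (out : String) : Decidable (Spec_remove_repeated_headers text headers out) := by unfold Spec_remove_repeated_headers; infer_instance

-- ===== CLAIM (what is proved, stated in full; the proofs are below) =====
def Claim_equal_remove_repeated_headers : Prop := ∀ (text : String) (headers : List String), Dom_remove_repeated_headers text headers → Spec_remove_repeated_headers text headers (remove_repeated_headers text headers)

-- ===== LEMMAS AND PROOFS =====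

-- canonical form both loops are reduced to: keep a line iff it is not a header line
-- or no earlier line (prev) has the same stripped value
def pvSpec (headers : List String) : List String → List String → List String
  | [], _ => []
  | l :: rest, prev =>
    if headers.contains (PySem.Str.strip l) &&
       (prev.map PySem.Str.strip).contains (PySem.Str.strip l)
    then pvSpec headers rest (prev ++ [l])
    else l :: pvSpec headers rest (prev ++ [l])

-- first index ≥ m (in ls enumerated from m) of a line whose stripped value is k and is a header
def pvFirstAt (headers : List String) (k : String) : List String → Int → Option Int
  | [], _ => none
  | l :: rest, m =>
    if headers.contains (PySem.Str.strip l) && (PySem.Str.strip l == k) then some m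
    else pvFirstAt headers k rest (m + 1)

theorem pvGoA_eq_spec (headers : List String) (ls : List String) :
    ∀ (prev : List String) (cnt : PySem.Dict String Int),
      (∀ k, headers.contains k = true →
        0 ≤ cnt.getD k 0 ∧ (0 < cnt.getD k 0 ↔ k ∈ prev.map PySem.Str.strip)) →
      pvGoA headers ls cnt = pvSpec headers ls prev := by
  induction ls with
  | nil => intro prev cnt _; simp [pvGoA, pvSpec]
  | cons l rest ih =>
    intro prev cnt hinv
    by_cases hH : headers.contains (PySem.Str.strip l) = true
    · obtain ⟨hpos, hmem⟩ := hinv _ hH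
      have hinv' : ∀ k, headers.contains k = true →
          0 ≤ (cnt.modify (PySem.Str.strip l) 0 (· + 1)).getD k 0 ∧
          (0 < (cnt.modify (PySem.Str.strip l) 0 (· + 1)).getD k 0 ↔
            k ∈ (prev ++ [l]).map PySem.Str.strip) := by
        intro k hk
        by_cases hkl : k = PySem.Str.strip l
        · subst hkl
          rw [PySem.Dict.getD_modify_self]
          constructor
          · omega
          · simp; omega
        · rw [PySem.Dict.getD_modify_of_ne _ _ _ hkl]
          refine ⟨(hinv k hk).1, ?_⟩
          rw [(hinv k hk).2]
          simp [hkl]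
      by_cases hle : cnt.getD (PySem.Str.strip l) 0 + 1 ≤ 1
      · have hnm : (PySem.Str.strip l) ∉ prev.map PySem.Str.strip := by
          rw [← hmem]; omega
        simp only [pvGoA, pvSpec, hH]
        rw [PySem.Dict.getD_modify_self]
        simp only [if_pos hle]
        have : ((prev.map PySem.Str.strip).contains (PySem.Str.strip l)) = false := by
          simpa using hnm
        simp only [this, Bool.and_false, Bool.false_eq_true, if_false]
        exact congrArg _ (ih _ _ hinv')
      · have hm : (PySem.Str.strip l) ∈ prev.map PySem.Str.strip := by
          rw [← hmem]; omega
        simp only [pvGoA, pvSpec, hH]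
        rw [PySem.Dict.getD_modify_self]
        simp only [if_neg hle]
        have : ((prev.map PySem.Str.strip).contains (PySem.Str.strip l)) = true := by
          simpa using hm
        simp only [this, Bool.and_true]
        simp only [if_true]
        exact ih _ _ hinv'
    · have hH' : headers.contains (PySem.Str.strip l) = false := by
        simpa using hH
      have hinv' : ∀ k, headers.contains k = true →
          0 ≤ cnt.getD k 0 ∧ (0 < cnt.getD k 0 ↔ k ∈ (prev ++ [l]).map PySem.Str.strip) := by
        intro k hk
        have hkl : k ≠ PySem.Str.strip l := by
          intro h; rw [h] at hk; rw [hk] at hH'; exact absurd hH' (by simp)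
        refine ⟨(hinv k hk).1, ?_⟩
        rw [(hinv k hk).2]; simp [hkl]
      simp only [pvGoA, pvSpec, hH', Bool.false_and, Bool.false_eq_true, if_false]
      exact congrArg _ (ih _ _ hinv')

theorem pvBuildIdx_get? (headers : List String) (k : String) (ls : List String) :
    ∀ (m : Int) (d : PySem.Dict String Int),
      (pvBuildIdx headers (PySem.List.enumerate ls m) d).get? k =
        if d.contains k then d.get? k else pvFirstAt headers k ls m := by
  induction ls with
  | nil =>
    intro m d
    simp only [PySem.List.enumerate, pvBuildIdx, pvFirstAt]
    by_cases h : d.contains k = true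
    · simp [h]
    · have h' : d.contains k = false := by simpa using h
      simp [h', PySem.Dict.get?_eq_none_iff_contains]
  | cons l rest ih =>
    intro m d
    rw [show PySem.List.enumerate (l :: rest) m = (m, l) :: PySem.List.enumerate rest (m + 1) from rfl]
    simp only [pvBuildIdx]
    by_cases hg : (headers.contains (PySem.Str.strip l) && !(d.contains (PySem.Str.strip l))) = true
    · rw [if_pos hg, ih]
      obtain ⟨hh, hnc⟩ := Bool.and_eq_true_iff.mp hg
      have hnc' : d.contains (PySem.Str.strip l) = false := by simpa using hnc
      by_cases hkl : k = PySem.Str.strip l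
      · subst hkl
        have hh' : PySem.Str.strip l ∈ headers := by simpa using hh
        simp [PySem.Dict.get?_insert_self, hnc', pvFirstAt, hh']
      · have hc : (d.insert (PySem.Str.strip l) m).contains k = d.contains k := by
          simp [PySem.Dict.contains_insert, hkl]
        rw [hc, PySem.Dict.get?_insert_of_ne _ _ hkl]
        simp only [pvFirstAt]
        have : (PySem.Str.strip l == k) = false := by simp [Ne.symm hkl]
        simp [this]
    · rw [if_neg hg, ih]
      by_cases hdk : d.contains k = true
      · simp [hdk]
      · have hdk' : d.contains k = false := by simpa using hdk
        simp only [hdk', Bool.false_eq_true, if_false]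
        have hhead : (headers.contains (PySem.Str.strip l) && (PySem.Str.strip l == k)) = false := by
          by_cases hkl : PySem.Str.strip l = k
          · subst hkl
            simp only [Bool.and_eq_false_iff]
            left
            by_contra hcc
            apply hg
            simp only [Bool.and_eq_true_iff, Bool.not_eq_true']
            exact ⟨by simpa using hcc, hdk'⟩
          · simp [hkl]
        simp only [pvFirstAt, hhead, Bool.false_eq_true, if_false]

theorem pvFirstAt_append_skip (headers : List String) (k : String) (ls' : List String) :
    ∀ (prev : List String) (m : Int),
      (∀ p ∈ prev, (PySem.Str.strip p == k) = false ∨ headers.contains (PySem.Str.strip p) = false) →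
      pvFirstAt headers k (prev ++ ls') m = pvFirstAt headers k ls' (m + prev.length) := by
  intro prev
  induction prev with
  | nil => intro m _; simp
  | cons q prev' ih =>
    intro m hp
    have hq : (headers.contains (PySem.Str.strip q) && (PySem.Str.strip q == k)) = false := by
      rcases hp q (by simp) with h | h
      · simp [h]
      · have h' : PySem.Str.strip q ∉ headers := by simpa using h
        simp [h']
    simp only [List.cons_append, pvFirstAt, hq, Bool.false_eq_true, if_false]
    rw [ih (m + 1) (fun p hp' => hp p (by simp [hp']))]
    congr 1
    simp; omega

theorem pvFirstAt_append_hit (headers : List String) (k : String) (ls' : List String) :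
    ∀ (prev : List String) (m : Int),
      (∃ p ∈ prev, headers.contains (PySem.Str.strip p) = true ∧ PySem.Str.strip p = k) →
      ∃ j, pvFirstAt headers k (prev ++ ls') m = some j ∧ j < m + prev.length := by
  intro prev
  induction prev with
  | nil => intro m h; simp at h
  | cons q prev' ih =>
    intro m hex
    by_cases hq : (headers.contains (PySem.Str.strip q) && (PySem.Str.strip q == k)) = true
    · refine ⟨m, ?_, by simp⟩
      simp only [List.cons_append, pvFirstAt, hq, if_true]
    · obtain ⟨p, hpmem, hph, hpk⟩ := hex
      rcases List.mem_cons.mp hpmem with h | h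
      · exfalso
        apply hq
        subst h
        simp only [Bool.and_eq_true_iff]
        exact ⟨hph, by simp [hpk]⟩
      · obtain ⟨j, hj, hjlt⟩ := ih (m + 1) ⟨p, h, hph, hpk⟩
        refine ⟨j, ?_, by simp at hjlt ⊢; omega⟩
        have hq' : (headers.contains (PySem.Str.strip q) && (PySem.Str.strip q == k)) = false := by
          simpa using hq
        simp only [List.cons_append, pvFirstAt, hq', Bool.false_eq_true, if_false]
        exact hj

theorem pvFilter_eq_spec (headers : List String) (all : List String)
    (fi : PySem.Dict String Int)
    (hfi : ∀ k, fi.get? k = pvFirstAt headers k all 0) :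
    ∀ (rest prev : List String), all = prev ++ rest →
      ((PySem.List.enumerate rest (prev.length : Int)).filter
          (fun p => !(headers.contains (PySem.Str.strip p.2)) ||
                    (fi.get? (PySem.Str.strip p.2) == some p.1))).map (·.2)
        = pvSpec headers rest prev := by
  intro rest
  induction rest with
  | nil => intro prev _; simp [pvSpec]
  | cons l rest' ih =>
    intro prev hall
    have hlen : ((prev ++ [l]).length : Int) = (prev.length : Int) + 1 := by
      simp
    have ihl := ih (prev ++ [l]) (by simpa [List.append_assoc] using hall)
    rw [hlen] at ihl
    rw [show PySem.List.enumerate (l :: rest') (prev.length : Int) =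
        ((prev.length : Int), l) :: PySem.List.enumerate rest' ((prev.length : Int) + 1) from rfl]
    by_cases hH : headers.contains (PySem.Str.strip l) = true
    · -- header line: kept iff first index equals this one
      by_cases hmem : PySem.Str.strip l ∈ prev.map PySem.Str.strip
      · -- seen before: dropped
        obtain ⟨p, hp, hpk⟩ := List.mem_map.mp hmem
        have hit := pvFirstAt_append_hit headers (PySem.Str.strip l) (l :: rest') prev 0
          ⟨p, hp, by rw [hpk]; exact hH, hpk⟩
        obtain ⟨j, hj, hjlt⟩ := hit
        have hne : (fi.get? (PySem.Str.strip l) == some ((prev.length : Int))) = false := by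
          rw [hfi, hall, hj]
          simp only [beq_eq_false_iff_ne, ne_eq, Option.some.injEq]
          omega
        have hcontains : ((prev.map PySem.Str.strip).contains (PySem.Str.strip l)) = true := by
          simpa using hmem
        simp only [List.filter_cons, hH, Bool.not_true, Bool.false_or, hne,
          Bool.false_eq_true, if_false, pvSpec, hcontains, Bool.and_true, if_true]
        exact ihl
      · -- first occurrence: kept
        have hskip := pvFirstAt_append_skip headers (PySem.Str.strip l) (l :: rest') prev 0
          (by
            intro p hp
            left
            simp only [beq_eq_false_iff_ne, ne_eq]
            intro hc
            exact hmem (List.mem_map.mpr ⟨p, hp, hc⟩))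
        have hhead : pvFirstAt headers (PySem.Str.strip l) (l :: rest') ((0 : Int) + prev.length)
            = some ((prev.length : Int)) := by
          have hHm : PySem.Str.strip l ∈ headers := by simpa using hH
          simp [pvFirstAt, hHm]
        have heq : (fi.get? (PySem.Str.strip l) == some ((prev.length : Int))) = true := by
          rw [hfi, hall, hskip, hhead]
          exact beq_self_eq_true _
        have hcontains : ((prev.map PySem.Str.strip).contains (PySem.Str.strip l)) = false := by
          simpa using hmem
        simp only [List.filter_cons, hH, Bool.not_true, Bool.false_or, heq, if_true,
          List.map_cons, pvSpec, hcontains, Bool.and_false, Bool.false_eq_true, if_false]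
        exact congrArg _ ihl
    · have hH' : headers.contains (PySem.Str.strip l) = false := by simpa using hH
      simp only [List.filter_cons, hH', Bool.not_false, Bool.true_or, if_true,
        List.map_cons, pvSpec, Bool.false_and, Bool.false_eq_true, if_false]
      exact congrArg _ ihl

-- ===== VERDICT (by name: the statement is the Claim_ definition above) =====
theorem remove_repeated_headers_spec : Claim_equal_remove_repeated_headers := by
  intro text headers _
  unfold Spec_remove_repeated_headers remove_repeated_headers remove_repeated_headers_alt
  by_cases hE : headers.isEmpty
  · simp [hE]
  · simp only [hE, Bool.false_eq_true, if_false]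
    set lines := (PySem.Str.split? text "\n").getD [] with hlines
    have hA : pvGoA headers lines PySem.Dict.empty = pvSpec headers lines [] := by
      apply pvGoA_eq_spec
      intro k _
      simp [PySem.Dict.getD_empty]
    have hB : ((PySem.List.enumerate lines 0).filter
          (fun p => !(headers.contains (PySem.Str.strip p.2)) ||
            ((pvBuildIdx headers (PySem.List.enumerate lines 0) PySem.Dict.empty).get?
              (PySem.Str.strip p.2) == some p.1))).map (·.2) = pvSpec headers lines [] := by
      have hfi : ∀ k, (pvBuildIdx headers (PySem.List.enumerate lines 0) PySem.Dict.empty).get? k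
          = pvFirstAt headers k lines 0 := by
        intro k
        rw [pvBuildIdx_get?]
        simp [PySem.Dict.contains_empty]
      have := pvFilter_eq_spec headers lines _ hfi lines [] (by simp)
      simpa using this
    rw [hA, ← hB]
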